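-- pv_equiv track=rewrite | github.com/bigyancodes/sajilo_cms | backend/apps/chatbot/doctor_utils.py | format_doctor_list
-- ===== SOURCE A (Python) =====
-- def format_doctor_list(doctors, include_specialties=True):
--     """
--     Format doctor list into readable text
--
--     Args:
--         doctors: List of doctor information dictionaries
--         include_specialties: Whether to include specialty information
--
--     Returns:
--         Formatted string with doctor list
--     """
--     if not doctors:
--         return "We don't have any doctors matching your criteria in our system at the moment."
--
--     # Group doctors by specialty if needed
--     if include_specialties:
--         doctors_by_specialty = {}
--         for doctor in doctors:
--             specialty = doctor['specialty']
--             if specialty not in doctors_by_specialty: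
--                 doctors_by_specialty[specialty] = []
--             doctors_by_specialty[specialty].append(doctor)
--
--         # Create response
--         response = f"We have {len(doctors)} doctors available:\n\n"
--
--         for specialty, specialty_doctors in doctors_by_specialty.items():
--             response += f"**{specialty}**\n"
--             for doctor in specialty_doctors:
--                 response += f"- {doctor['name']}\n"
--             response += "\n"
--     else:
--         # Simple list without grouping
--         response = f"We have {len(doctors)} doctors available:\n\n"
--         for doctor in doctors:
--             response += f"- {doctor['name']}"
--             if include_specialties:
--                 response += f" ({doctor['specialty']})"
--             response += "\n"
--
--     response += "\nTo schedule an appointment, please use the patient portal or contact our reception desk."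
--
--     return response
-- ===== SOURCE B (Python) =====
-- def format_doctor_list(doctors, include_specialties=True):
--     if not doctors:
--         return "We don't have any doctors matching your criteria in our system at the moment."
--     header = f"We have {len(doctors)} doctors available:\n\n"
--     if include_specialties:
--         # first-appearance-ordered list of distinct specialties
--         seen = set()
--         order = []
--         for doctor in doctors:
--             s = doctor['specialty']
--             if s not in seen:
--                 seen.add(s)
--                 order.append(s)
--         body = ""
--         for s in order:
--             body += f"**{s}**\n"
--             for doctor in doctors:
--                 if doctor['specialty'] == s:
--                     body += f"- {doctor['name']}\n"
--             body += "\n"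
--     else:
--         body = ""
--         for doctor in doctors:
--             body += f"- {doctor['name']}\n"
--     return header + body + "\nTo schedule an appointment, please use the patient portal or contact our reception desk."
-- ===== Notes on version B (the rewrite author's own statement) =====
-- stated objective: alternative
-- what changed: B replaces A's dict-of-lists grouping (build a specialty->doctors dict, then iterate its items) by a first-appearance-ordered list of distinct specialties plus a rescan of the whole doctor list per specialty, and assembles header/body/footer by concatenation instead of threading one growing response string.
import Mathlib
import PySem

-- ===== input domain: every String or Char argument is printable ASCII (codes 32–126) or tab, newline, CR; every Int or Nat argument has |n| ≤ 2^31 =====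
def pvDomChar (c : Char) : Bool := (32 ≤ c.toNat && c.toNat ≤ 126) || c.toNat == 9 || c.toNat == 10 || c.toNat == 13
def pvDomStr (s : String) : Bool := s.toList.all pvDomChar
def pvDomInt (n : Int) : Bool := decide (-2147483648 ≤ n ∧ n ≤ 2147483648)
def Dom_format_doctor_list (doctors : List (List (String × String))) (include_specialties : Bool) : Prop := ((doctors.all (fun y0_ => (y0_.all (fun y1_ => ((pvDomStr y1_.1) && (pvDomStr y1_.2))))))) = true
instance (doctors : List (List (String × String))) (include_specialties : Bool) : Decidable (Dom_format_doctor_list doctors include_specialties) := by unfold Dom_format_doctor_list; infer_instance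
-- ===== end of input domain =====

-- B replaces A's dict-of-lists grouping by a first-appearance-ordered list of distinct
-- specialties plus a rescan of the doctor list per specialty (alternative decomposition,
-- not claimed faster); return values proved equal on Pre_.


-- shared helpers: doctor['specialty'] / doctor['name'] (present under Pre_, so getD's default is never used)
def pvSpec (doc : List (String × String)) : String := (PySem.Dict.mk doc).getD "specialty" ""
def pvName (doc : List (String × String)) : String := (PySem.Dict.mk doc).getD "name" ""

-- ===== PORT A =====
def format_doctor_list (doctors : List (List (String × String))) (include_specialties : Bool) : String :=
  if doctors = [] then
    "We don't have any doctors matching your criteria in our system at the moment."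
  else
    let response :=
      if include_specialties then
        let dbs := doctors.foldl
          (fun (d : PySem.Dict String (List (List (String × String)))) doc =>
            let s := pvSpec doc
            let d := if d.contains s then d else d.insert s []
            d.modify s [] (fun l => l ++ [doc]))
          PySem.Dict.empty
        let r0 := "We have " ++ PySem.Int.toStr (doctors.length : Int) ++ " doctors available:\n\n"
        dbs.items.foldl
          (fun r p =>
            let r := r ++ "**" ++ p.1 ++ "**\n"
            let r := p.2.foldl (fun r doc => r ++ "- " ++ pvName doc ++ "\n") r
            r ++ "\n") r0
      else
        doctors.foldl
          (fun r doc =>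
            let r := r ++ "- " ++ pvName doc
            let r := if include_specialties then r ++ " (" ++ pvSpec doc ++ ")" else r
            r ++ "\n")
          ("We have " ++ PySem.Int.toStr (doctors.length : Int) ++ " doctors available:\n\n")
    response ++ "\nTo schedule an appointment, please use the patient portal or contact our reception desk."

-- ===== PORT B =====
def format_doctor_list_alt (doctors : List (List (String × String))) (include_specialties : Bool) : String :=
  if doctors = [] then
    "We don't have any doctors matching your criteria in our system at the moment."
  else
    let header := "We have " ++ PySem.Int.toStr (doctors.length : Int) ++ " doctors available:\n\n"
    let body :=
      if include_specialties then
        let order := (doctors.foldl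
          (fun (p : PySem.Set String × List String) doc =>
            let s := pvSpec doc
            if PySem.Set.contains p.1 s then p else (PySem.Set.add p.1 s, p.2 ++ [s]))
          (PySem.Set.empty, [])).2
        order.foldl
          (fun b s =>
            let b := b ++ "**" ++ s ++ "**\n"
            let b := doctors.foldl
              (fun b doc => if pvSpec doc == s then b ++ "- " ++ pvName doc ++ "\n" else b) b
            b ++ "\n") ""
      else
        doctors.foldl (fun b doc => b ++ "- " ++ pvName doc ++ "\n") ""
    header ++ body ++ "\nTo schedule an appointment, please use the patient portal or contact our reception desk."

-- ===== PRECONDITION & SPEC =====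
-- Pre_ excludes doctors missing the looked-up keys (Python raises KeyError there), and
-- doctor assoc lists with duplicate keys, which do not arise from a Python dict (a dict
-- keeps one entry per key), so that the assoc-list representation is faithful.
def Pre_format_doctor_list (doctors : List (List (String × String))) (include_specialties : Bool) : Prop :=
  ∀ doc ∈ doctors, (doc.map Prod.fst).Nodup ∧ "name" ∈ doc.map Prod.fst ∧
    (include_specialties = true → "specialty" ∈ doc.map Prod.fst)
instance (doctors : List (List (String × String))) (include_specialties : Bool) : Decidable (Pre_format_doctor_list doctors include_specialties) := by unfold Pre_format_doctor_list; infer_instance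

def pvWitness_format_doctor_list : (List (List (String × String))) × Bool :=
  ([[("name", "Alice"), ("specialty", "Cardiology")], [("name", "Bob"), ("specialty", "Cardiology")]], true)

def Spec_format_doctor_list (doctors : List (List (String × String))) (include_specialties : Bool) (out : String) : Prop := out = format_doctor_list_alt doctors include_specialties
instance (doctors : List (List (String × String))) (include_specialties : Bool) (out : String) : Decidable (Spec_format_doctor_list doctors include_specialties out) := by unfold Spec_format_doctor_list; infer_instance

-- ===== CLAIM (what is proved, stated in full; the proofs are below) =====
def Claim_equal_format_doctor_list : Prop := ∀ (doctors : List (List (String × String))) (include_specialties : Bool), Dom_format_doctor_list doctors include_specialties → Pre_format_doctor_list doctors include_specialties → Spec_format_doctor_list doctors include_specialties (format_doctor_list doctors include_specialties)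


-- ===== LEMMAS AND PROOFS =====

-- a fold that appends a chunk per element can be started from "" and prefixed
theorem pv_str_shift {α : Type} (g : String → α → String) (C : α → String)
    (h : ∀ r x, g r x = r ++ C x) : ∀ (xs : List α) (r : String),
    xs.foldl g r = r ++ xs.foldl g "" := by
  intro xs
  induction xs with
  | nil => intro r; simp [List.foldl]
  | cons x xs ih =>
    intro r
    simp only [List.foldl]
    rw [ih (g r x), ih (g "" x), h r x, h "" x]
    simp [String.append_assoc]

-- A's "ensure key, then append" step is Dict.modify
theorem pv_stepA_modify (d : PySem.Dict String (List (List (String × String))))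
    (s : String) (x : List (String × String)) :
    (if d.contains s then d else d.insert s []).modify s [] (fun l => l ++ [x])
      = d.modify s [] (fun l => l ++ [x]) := by
  by_cases h : d.contains s = true
  · simp [h]
  · simp only [Bool.not_eq_true] at h
    have hg := PySem.Dict.getD_of_not_contains d ([] : List (List (String × String))) h
    simp [h, PySem.Dict.modify, PySem.Dict.getD_insert_self,
      PySem.Dict.insert_insert_self, hg]

-- B's inner rescan over all doctors is the fold over the filtered group
theorem pv_innerB (doctors : List (List (String × String))) (k : String) :
    ∀ (r : String),
    doctors.foldl (fun b doc => if pvSpec doc == k then b ++ "- " ++ pvName doc ++ "\n" else b) r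
      = (doctors.filter (fun doc => pvSpec doc == k)).foldl
          (fun b doc => b ++ "- " ++ pvName doc ++ "\n") r := by
  induction doctors with
  | nil => intro r; simp
  | cons x xs ih =>
    intro r
    by_cases h : pvSpec x == k
    · simp only [List.foldl, List.filter, h, if_true]
      exact ih _
    · simp only [Bool.not_eq_true] at h
      simp only [List.foldl, List.filter, h, if_false, Bool.false_eq_true]
      exact ih r

-- B's (seen, order) fold keeps both components equal to the growing Set
theorem pv_pair_inv (doctors : List (List (String × String))) :
    ∀ (s : PySem.Set String),
    doctors.foldl
      (fun (p : PySem.Set String × List String) doc =>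
        let s := pvSpec doc
        if PySem.Set.contains p.1 s then p else (PySem.Set.add p.1 s, p.2 ++ [s]))
      (s, s)
    = (doctors.foldl (fun t doc => PySem.Set.add t (pvSpec doc)) s,
       doctors.foldl (fun t doc => PySem.Set.add t (pvSpec doc)) s) := by
  induction doctors with
  | nil => intro s; simp
  | cons x xs ih =>
    intro s
    have hstep : (fun (p : PySem.Set String × List String) doc =>
        let s := pvSpec doc
        if PySem.Set.contains p.1 s then p else (PySem.Set.add p.1 s, p.2 ++ [s])) (s, s) x
        = (PySem.Set.add s (pvSpec x), PySem.Set.add s (pvSpec x)) := by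
      by_cases hm : pvSpec x ∈ s
      · simp [PySem.Set.add, hm]
      · simp [PySem.Set.add, hm]
    simp only [List.foldl_cons]
    rw [show (let s_1 := pvSpec x;
        if (s, s).1.contains s_1 = true then (s, s)
        else ((s, s).1.add s_1, (s, s).2 ++ [s_1]))
      = (PySem.Set.add s (pvSpec x), PySem.Set.add s (pvSpec x)) from hstep]
    exact ih _

theorem pv_orderB (doctors : List (List (String × String))) :
    (doctors.foldl
      (fun (p : PySem.Set String × List String) doc =>
        let s := pvSpec doc
        if PySem.Set.contains p.1 s then p else (PySem.Set.add p.1 s, p.2 ++ [s]))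
      (PySem.Set.empty, [])).2
    = PySem.Set.ofList (doctors.map pvSpec) := by
  rw [show (PySem.Set.empty, ([] : List String)) = ((PySem.Set.empty : PySem.Set String), (PySem.Set.empty : PySem.Set String)) from rfl]
  rw [pv_pair_inv]
  rw [← PySem.Set.update_map_eq_foldl_add doctors pvSpec PySem.Set.empty]
  exact PySem.Set.update_nil_left _

-- A's grouping dict, characterised
theorem pv_getDA (doctors : List (List (String × String))) (k : String) :
    (doctors.foldl (fun d doc => d.modify (pvSpec doc) [] (fun l => l ++ [doc])) PySem.Dict.empty).getD k []
      = doctors.filter (fun doc => pvSpec doc == k) := by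
  have h := PySem.Dict.getD_foldl_modify_append
    (doctors.map (fun doc => (pvSpec doc, doc))) PySem.Dict.empty k
  rw [List.foldl_map] at h
  simpa [List.filter_map, Function.comp_def] using h

theorem pv_keysA (doctors : List (List (String × String))) :
    (doctors.foldl (fun d doc => d.modify (pvSpec doc) [] (fun l => l ++ [doc])) PySem.Dict.empty).keys
      = PySem.Set.ofList (doctors.map pvSpec) := by
  have h := PySem.Dict.keys_foldl_modify_key doctors pvSpec []
    (fun _ doc l => l ++ [doc]) PySem.Dict.empty
  simpa [PySem.Dict.keys_empty, PySem.Set.update_nil_left] using h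

theorem pv_itemsA (doctors : List (List (String × String))) :
    (doctors.foldl (fun d doc => d.modify (pvSpec doc) [] (fun l => l ++ [doc])) PySem.Dict.empty).items
      = (PySem.Set.ofList (doctors.map pvSpec)).map
          (fun k => (k, doctors.filter (fun doc => pvSpec doc == k))) := by
  have hnd : (doctors.foldl (fun d doc => d.modify (pvSpec doc) [] (fun l => l ++ [doc])) PySem.Dict.empty).keys.Nodup := by
    have := PySem.Dict.nodup_keys_foldl_modify_key doctors pvSpec []
      (fun _ doc l => l ++ [doc]) PySem.Dict.empty (by simp)
    exact this
  rw [PySem.Dict.items_eq_map_keys _ hnd [], pv_keysA]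
  exact List.map_congr_left (fun k _ => by rw [pv_getDA])

theorem pv_AB_eq (doctors : List (List (String × String))) (include_specialties : Bool) :
    format_doctor_list doctors include_specialties
      = format_doctor_list_alt doctors include_specialties := by
  unfold format_doctor_list format_doctor_list_alt
  by_cases hd : doctors = []
  · simp [hd]
  · rw [if_neg hd, if_neg hd]
    cases include_specialties with
    | false =>
      simp only [Bool.false_eq_true, if_false]
      rw [pv_str_shift _ (fun doc => "- " ++ pvName doc ++ "\n")
        (by intro r x; simp [String.append_assoc]) doctors]
    | true =>
      simp only [if_true]
      -- A's dict fold is the plain modify fold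
      have hfold : doctors.foldl
          (fun (d : PySem.Dict String (List (List (String × String)))) doc =>
            let s := pvSpec doc
            let d := if d.contains s then d else d.insert s []
            d.modify s [] (fun l => l ++ [doc]))
          PySem.Dict.empty
        = doctors.foldl (fun d doc => d.modify (pvSpec doc) [] (fun l => l ++ [doc])) PySem.Dict.empty := by
        apply List.foldl_ext
        intro d doc _
        exact pv_stepA_modify d (pvSpec doc) doc
      rw [hfold, pv_itemsA, List.foldl_map, pv_orderB]
      -- both outer folds now run over the same distinct-specialty list
      have hinner : ∀ (r : String) (k : String),
          doctors.foldl (fun b doc => if pvSpec doc == k then b ++ "- " ++ pvName doc ++ "\n" else b) r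
            = (doctors.filter (fun doc => pvSpec doc == k)).foldl
                (fun b doc => b ++ "- " ++ pvName doc ++ "\n") r := by
        intro r k; exact pv_innerB doctors k r
      have hB : (PySem.Set.ofList (doctors.map pvSpec)).foldl
          (fun b s =>
            let b := b ++ "**" ++ s ++ "**\n"
            let b := doctors.foldl
              (fun b doc => if pvSpec doc == s then b ++ "- " ++ pvName doc ++ "\n" else b) b
            b ++ "\n") ""
        = (PySem.Set.ofList (doctors.map pvSpec)).foldl
          (fun r k =>
            ((doctors.filter (fun doc => pvSpec doc == k)).foldl
              (fun b doc => b ++ "- " ++ pvName doc ++ "\n") (r ++ "**" ++ k ++ "**\n")) ++ "\n") "" := by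
        apply List.foldl_ext
        intro b k _
        simp only [hinner]
      rw [hB]
      have hstep : ∀ (r : String) (k : String),
          ((doctors.filter (fun doc => pvSpec doc == k)).foldl
              (fun b doc => b ++ "- " ++ pvName doc ++ "\n") (r ++ "**" ++ k ++ "**\n")) ++ "\n"
          = r ++ ((("**" ++ k ++ "**\n") ++
              (doctors.filter (fun doc => pvSpec doc == k)).foldl
                (fun b doc => b ++ "- " ++ pvName doc ++ "\n") "") ++ "\n") := by
        intro r k
        rw [pv_str_shift _ (fun doc => "- " ++ pvName doc ++ "\n")
          (by intro r x; simp [String.append_assoc])]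
        simp [String.append_assoc]
      rw [pv_str_shift _
        (fun k => (("**" ++ k ++ "**\n") ++
          (doctors.filter (fun doc => pvSpec doc == k)).foldl
            (fun b doc => b ++ "- " ++ pvName doc ++ "\n") "") ++ "\n")
        hstep ((PySem.Set.ofList (doctors.map pvSpec)))]

-- ===== VERDICT (by name: the statement is the Claim_ definition above) =====
theorem format_doctor_list_spec : Claim_equal_format_doctor_list := by
  intro doctors include_specialties _ _
  unfold Spec_format_doctor_list
  exact pv_AB_eq doctors include_specialties
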